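-- pv_equiv track=rewrite | github.com/paiml/depyler | examples/hard_crypto_hash.py | huffman_sorted_pairs
-- ===== SOURCE A (Python) =====
-- from typing import Dict, List, Optional, Tuple
--
-- def huffman_sorted_pairs(data: str) -> List[Tuple[str, int]]:
--     """Count character frequencies and return sorted by count ascending."""
--     freq: Dict[str, int] = {}
--     for ch in data:
--         if ch in freq:
--             freq[ch] += 1
--         else:
--             freq[ch] = 1
--     pairs: List[Tuple[str, int]] = []
--     for ch in freq:
--         pairs.append((ch, freq[ch]))
--     n: int = len(pairs)
--     for i in range(n):
--         for j in range(0, n - i - 1):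
--             if pairs[j][1] > pairs[j + 1][1]:
--                 temp: Tuple[str, int] = pairs[j]
--                 pairs[j] = pairs[j + 1]
--                 pairs[j + 1] = temp
--     return pairs
-- ===== SOURCE B (Python) =====
-- from typing import Dict, List, Tuple
--
-- def huffman_sorted_pairs(data: str) -> List[Tuple[str, int]]:
--     """Count character frequencies; order pairs by count ascending with a
--     comparison-free counting sweep over the count values instead of a sort."""
--     freq: Dict[str, int] = {}
--     for ch in data:
--         freq[ch] = freq.get(ch, 0) + 1
--     if not freq:
--         return []
--     max_count = max(freq.values())
--     result: List[Tuple[str, int]] = []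
--     for count in range(1, max_count + 1):
--         for ch, c in freq.items():
--             if c == count:
--                 result.append((ch, c))
--     return result
-- ===== Notes on version B (the rewrite author's own statement) =====
-- stated objective: alternative
-- what changed: Replaced the O(d^2) index-swapping bubble sort of the (char,count) pairs by a comparison-free counting sweep: for each count value from 1 to max(freq.values()) emit, in dict insertion order, the pairs with that count, which reproduces the stable ascending order without any sorting.
import Mathlib
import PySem

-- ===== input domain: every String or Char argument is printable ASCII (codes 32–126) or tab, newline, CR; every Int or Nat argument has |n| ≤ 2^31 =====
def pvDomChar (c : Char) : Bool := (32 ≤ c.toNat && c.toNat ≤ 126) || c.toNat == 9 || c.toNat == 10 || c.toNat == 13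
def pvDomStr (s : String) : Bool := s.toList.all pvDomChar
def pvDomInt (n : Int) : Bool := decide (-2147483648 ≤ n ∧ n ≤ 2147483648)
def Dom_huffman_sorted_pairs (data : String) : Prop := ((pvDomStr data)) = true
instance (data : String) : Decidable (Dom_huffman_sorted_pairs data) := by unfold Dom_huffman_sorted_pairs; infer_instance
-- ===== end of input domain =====

-- B replaces A's index-swapping bubble sort of the (char, count) pairs by a comparison-free
-- counting sweep over the count values 1..max(freq.values()); objective: alternative algorithm.

-- ===== PORT A =====
-- helper: one inner-loop step of A's bubble sort ('if pairs[j][1] > pairs[j+1][1]: swap');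
-- when called, j and j+1 are always in range, so pyGetD's default and .set/.toNat are exact
def pvBubbleStep (ps : List (String × Int)) (j : Int) : List (String × Int) :=
  if (PySem.List.pyGetD ps j ("", 0)).2 > (PySem.List.pyGetD ps (j + 1) ("", 0)).2 then
    let temp := PySem.List.pyGetD ps j ("", 0)
    let ps1 := ps.set j.toNat (PySem.List.pyGetD ps (j + 1) ("", 0))
    ps1.set (j + 1).toNat temp
  else ps

def huffman_sorted_pairs (data : String) : List (String × Int) :=
  -- 'for ch in data' iterates the characters as length-1 strings
  let chars : List String := data.toList.map (fun c => String.ofList [c])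
  let freq : PySem.Dict String Int :=
    chars.foldl (fun d ch =>
      if d.contains ch then d.insert ch (d.getD ch 0 + 1)  -- freq[ch] += 1 (key present: getD exact)
      else d.insert ch 1) PySem.Dict.empty
  let pairs : List (String × Int) :=
    freq.keys.foldl (fun acc ch => acc ++ [(ch, freq.getD ch 0)]) []  -- freq[ch]: key present, getD exact
  let n : Int := (pairs.length : Int)
  (PySem.List.pyRange 0 n 1).foldl (fun ps i =>
    (PySem.List.pyRange 0 (n - i - 1) 1).foldl pvBubbleStep ps) pairs

-- ===== PORT B =====
def huffman_sorted_pairs_alt (data : String) : List (String × Int) :=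
  let chars : List String := data.toList.map (fun c => String.ofList [c])
  let freq : PySem.Dict String Int :=
    chars.foldl (fun d ch => d.insert ch (d.getD ch 0 + 1)) PySem.Dict.empty
  if freq.size = 0 then []
  else
    -- max(freq.values()): values is nonempty here, so the .getD 0 default is unreachable
    let max_count : Int := (PySem.List.max? freq.values (fun v => v)).getD 0
    (PySem.List.pyRange 1 (max_count + 1) 1).foldl (fun acc count =>
      freq.items.foldl (fun acc p => if p.2 == count then acc ++ [p] else acc) acc) []

-- ===== PRECONDITION & SPEC =====
def Spec_huffman_sorted_pairs (data : String) (out : List (String × Int)) : Prop := out = huffman_sorted_pairs_alt data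
instance (data : String) (out : List (String × Int)) : Decidable (Spec_huffman_sorted_pairs data out) := by unfold Spec_huffman_sorted_pairs; infer_instance

-- ===== CLAIM (what is proved, stated in full; the proofs are below) =====
def Claim_equal_huffman_sorted_pairs : Prop := ∀ (data : String), Dom_huffman_sorted_pairs data → Spec_huffman_sorted_pairs data (huffman_sorted_pairs data)

-- ===== LEMMAS AND PROOFS =====

-- the ordering used throughout: compare pairs by their count
def pvLe (a b : String × Int) : Prop := a.2 ≤ b.2

-- structural form of one (partial) bubble pass, carrying the currently bubbling element
def pvBubbleC (c : String × Int) : List (String × Int) → List (String × Int)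
  | [] => [c]
  | x :: t => if x.2 < c.2 then x :: pvBubbleC c t else c :: pvBubbleC x t

-- A's outer-loop body, named for the invariant proof (definitionally A's lambda)
def pvPass (n : Int) (ps : List (String × Int)) (i : Int) : List (String × Int) :=
  (PySem.List.pyRange 0 (n - i - 1) 1).foldl pvBubbleStep ps

theorem pvBubbleC_length (c : String × Int) (t : List (String × Int)) :
    (pvBubbleC c t).length = t.length + 1 := by
  induction t generalizing c with
  | nil => simp [pvBubbleC]
  | cons x t ih => simp only [pvBubbleC]; split <;> simp [ih]

theorem pvBubbleC_mem (c y : String × Int) (t : List (String × Int)) :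
    y ∈ pvBubbleC c t ↔ y ∈ c :: t := by
  induction t generalizing c with
  | nil => simp [pvBubbleC]
  | cons x t ih => simp only [pvBubbleC]; split <;> simp [ih] <;> tauto

theorem pvBubbleC_filter (c : String × Int) (t : List (String × Int)) (q : Int) :
    (pvBubbleC c t).filter (fun p => p.2 == q) = (c :: t).filter (fun p => p.2 == q) := by
  induction t generalizing c with
  | nil => simp [pvBubbleC]
  | cons x t ih =>
    simp only [pvBubbleC]
    split
    · rename_i hlt
      have := ih c
      by_cases hx : x.2 = q <;> by_cases hc : c.2 = q <;>
        simp_all [List.filter_cons]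
    · have := ih x
      simp_all [List.filter_cons]

theorem pvBubbleC_last (c : String × Int) (t : List (String × Int)) :
    ∃ w m, pvBubbleC c t = w ++ [m] ∧ m ∈ c :: t ∧ ∀ y ∈ c :: t, y.2 ≤ m.2 := by
  induction t generalizing c with
  | nil => exact ⟨[], c, by simp [pvBubbleC]⟩
  | cons x t ih =>
    simp only [pvBubbleC]
    split
    · rename_i hlt
      obtain ⟨w, m, he, hm, hmax⟩ := ih c
      refine ⟨x :: w, m, by simp [he], ?_, ?_⟩
      · rcases (by simpa using hm) with h | h
        · simp [h]
        · simp [h]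
      · intro y hy
        rcases (by simpa using hy) with h | h | h
        · exact hmax y (by simp [h])
        · subst h; exact le_of_lt (lt_of_lt_of_le hlt (hmax c (by simp)))
        · exact hmax y (by simp [h])
    · rename_i hge
      obtain ⟨w, m, he, hm, hmax⟩ := ih x
      refine ⟨c :: w, m, by simp [he], ?_, ?_⟩
      · rcases (by simpa using hm) with h | h
        · simp [h]
        · simp [h]
      · intro y hy
        rcases (by simpa using hy) with h | h | h
        · subst h; exact le_trans (le_of_not_gt hge) (hmax x (by simp))
        · exact hmax y (by simp [h])
        · exact hmax y (by simp [h])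

theorem pvStep_eval (u : List (String × Int)) (c x : String × Int) (t : List (String × Int)) :
    pvBubbleStep (u ++ c :: x :: t) (u.length : Int) =
      if x.2 < c.2 then u ++ x :: c :: t else u ++ c :: x :: t := by
  have h1 : PySem.List.pyGetD (u ++ c :: x :: t) (u.length : Int) ("", 0) = c := by
    rw [PySem.List.pyGetD_natCast]
    simp [List.getD]
  have h2 : PySem.List.pyGetD (u ++ c :: x :: t) ((u.length : Int) + 1) ("", 0) = x := by
    have : (u.length : Int) + 1 = ((u.length + 1 : Nat) : Int) := by push_cast; ring
    rw [this, PySem.List.pyGetD_natCast]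
    simp [List.getD]
  have h3 : (Int.toNat (u.length : Int)) = u.length := by simp
  have h4 : (Int.toNat ((u.length : Int) + 1)) = u.length + 1 := by omega
  simp only [pvBubbleStep, h1, h2, h3, h4, gt_iff_lt]
  split
  · rw [List.set_append]
    simp only [lt_irrefl, if_false, Nat.sub_self, List.set_cons_zero]
    rw [List.set_append]
    simp [List.set]
  · rfl

theorem pvInner (L : Nat) : ∀ (u : List (String × Int)) (c : String × Int)
    (rest : List (String × Int)), L ≤ rest.length →
    (PySem.List.pyRange (u.length : Int) ((u.length : Int) + (L : Int)) 1).foldl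
        pvBubbleStep (u ++ c :: rest)
      = u ++ pvBubbleC c (rest.take L) ++ rest.drop L := by
  induction L with
  | zero =>
    intro u c rest _
    rw [PySem.List.pyRange_one_eq_nil (by omega)]
    simp [pvBubbleC]
  | succ L ih =>
    intro u c rest hL
    cases rest with
    | nil => simp at hL
    | cons x t =>
      rw [PySem.List.pyRange_one_cons (by omega)]
      simp only [List.foldl_cons, pvStep_eval]
      have hlen : (u.length : Int) + 1 = (((u ++ [x]).length : Nat) : Int) := by simp
      split
      · rename_i hlt
        have hrec := ih (u ++ [x]) c t (by simpa using hL)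
        have hb : ((u.length : Int) + ((L + 1 : Nat) : Int)) = (((u ++ [x]).length : Int) + (L : Int)) := by
          simp; omega
        rw [hb, hlen, show u ++ x :: c :: t = (u ++ [x]) ++ c :: t by simp, hrec]
        simp only [List.take_succ_cons, List.drop_succ_cons, pvBubbleC, if_pos hlt]
        simp
      · rename_i hge
        have hrec := ih (u ++ [c]) x t (by simpa using hL)
        have hb : ((u.length : Int) + ((L + 1 : Nat) : Int)) = (((u ++ [c]).length : Int) + (L : Int)) := by
          simp; omega
        have hlen' : (u.length : Int) + 1 = (((u ++ [c]).length : Nat) : Int) := by simp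
        rw [hb, hlen', show u ++ c :: x :: t = (u ++ [c]) ++ x :: t by simp, hrec]
        simp only [List.take_succ_cons, List.drop_succ_cons, pvBubbleC, if_neg hge]
        simp

-- bubble-loop invariant: after k outer passes the last k elements are sorted and maximal,
-- and every per-count filter (hence the stable order within equal counts) is unchanged
theorem pvOuter (pairs : List (String × Int)) (k : Nat) (hk : k ≤ pairs.length) :
    ∀ r, r = (PySem.List.pyRange 0 (k : Int) 1).foldl (pvPass (pairs.length : Int)) pairs →
    r.length = pairs.length ∧
    (∀ q : Int, r.filter (fun p => p.2 == q) = pairs.filter (fun p => p.2 == q)) ∧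
    (r.drop (pairs.length - k)).Pairwise pvLe ∧
    (∀ a ∈ r.take (pairs.length - k), ∀ b ∈ r.drop (pairs.length - k), a.2 ≤ b.2) := by
  induction k with
  | zero =>
    intro r hr
    rw [PySem.List.pyRange_one_eq_nil (by omega)] at hr
    simp only [List.foldl_nil] at hr
    subst hr
    refine ⟨rfl, fun q => rfl, ?_, ?_⟩
    · rw [Nat.sub_zero, List.drop_length]; exact List.Pairwise.nil
    · rw [Nat.sub_zero, List.drop_length]; intro a _ b hb; simp at hb
  | succ k ih =>
    intro r' hr'
    have hk' : k ≤ pairs.length := by omega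
    have hkn : k < pairs.length := by omega
    obtain ⟨hlen, hfil, hsorted, hcross⟩ :=
      ih hk' ((PySem.List.pyRange 0 (k : Int) 1).foldl (pvPass (pairs.length : Int)) pairs) rfl
    set r := (PySem.List.pyRange 0 (k : Int) 1).foldl (pvPass (pairs.length : Int)) pairs with hrdef
    rw [show ((k + 1 : Nat) : Int) = (k : Int) + 1 by push_cast; ring,
        PySem.List.pyRange_one_succ_right (by positivity), List.foldl_append] at hr'
    simp only [List.foldl_cons, List.foldl_nil, ← hrdef] at hr'
    cases hrc : r with
    | nil => rw [hrc] at hlen; simp at hlen; omega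
    | cons c rest =>
    have hrestlen : rest.length = pairs.length - 1 := by
      rw [hrc] at hlen; simp at hlen; omega
    set L : Nat := pairs.length - 1 - k with hL
    have hLrest : L ≤ rest.length := by omega
    have hcast : (pairs.length : Int) - (k : Int) - 1 = ((L : Nat) : Int) := by
      simp only [hL]; omega
    have hpass : pvPass (pairs.length : Int) r (k : Int)
        = pvBubbleC c (rest.take L) ++ rest.drop L := by
      rw [pvPass, hcast, hrc]
      have := pvInner L [] c rest hLrest
      simpa using this
    rw [hpass] at hr'
    obtain ⟨w, m, he, hm, hmax⟩ := pvBubbleC_last c (rest.take L)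
    have hwlen : w.length = L := by
      have h1 := pvBubbleC_length c (rest.take L)
      rw [he] at h1
      simp [List.length_take, min_eq_left hLrest] at h1
      omega
    have hsub : pairs.length - k = L + 1 := by omega
    have htake : r.take (pairs.length - k) = c :: rest.take L := by
      rw [hrc, hsub, List.take_succ_cons]
    have hdrop : r.drop (pairs.length - k) = rest.drop L := by
      rw [hrc, hsub, List.drop_succ_cons]
    have hr'' : r' = w ++ ([m] ++ rest.drop L) := by
      rw [hr', he]; simp
    have hsub1 : pairs.length - (k + 1) = L := by omega
    refine ⟨?_, ?_, ?_, ?_⟩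
    · rw [hr'']
      simp [List.length_drop, hwlen]
      omega
    · intro q
      rw [hr', List.filter_append, pvBubbleC_filter, ← List.filter_append]
      have hjoin : (c :: rest.take L) ++ rest.drop L = c :: rest := by simp
      rw [hjoin, ← hrc]
      exact hfil q
    · rw [hr'', hsub1, List.drop_left' hwlen, List.singleton_append]
      refine List.pairwise_cons.mpr ⟨?_, ?_⟩
      · intro b hb
        exact hcross m (by rw [htake]; exact hm) b (by rw [hdrop]; exact hb)
      · rw [hdrop] at hsorted; exact hsorted
    · rw [hr'', hsub1, List.take_left' hwlen, List.drop_left' hwlen]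
      intro a ha b hb
      have ham : a ∈ c :: rest.take L := by
        rw [← pvBubbleC_mem, he]
        exact List.mem_append_left _ ha
      rcases List.mem_cons.mp (by simpa using hb) with hbm | hbD
      · subst hbm; exact hmax a ham
      · exact hcross a (by rw [htake]; exact ham) b (by rw [hdrop]; exact hbD)

-- two lists sorted by count with identical per-count filters are equal
theorem pvUnique : ∀ (l1 l2 : List (String × Int)), l1.Pairwise pvLe → l2.Pairwise pvLe →
    (∀ q : Int, l1.filter (fun p => p.2 == q) = l2.filter (fun p => p.2 == q)) → l1 = l2 := by
  intro l1
  induction l1 with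
  | nil =>
    intro l2 _ _ hf
    cases l2 with
    | nil => rfl
    | cons b t2 =>
      have := hf b.2
      simp [List.filter_cons] at this
  | cons a t1 ih =>
    intro l2 h1 h2 hf
    cases l2 with
    | nil =>
      have := hf a.2
      simp [List.filter_cons] at this
    | cons b t2 =>
      obtain ⟨h1h, h1t⟩ := List.pairwise_cons.mp h1
      obtain ⟨h2h, h2t⟩ := List.pairwise_cons.mp h2
      have hab : a.2 = b.2 := by
        have hfa := hf a.2
        have hfb := hf b.2
        have hb2 : ∃ y ∈ a :: t1, y.2 = b.2 := by
          have hmem : b ∈ (a :: t1).filter (fun p => p.2 == b.2) := by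
            rw [hfb]; simp [List.filter_cons]
          exact ⟨b, List.mem_of_mem_filter hmem, by simpa using List.of_mem_filter hmem⟩
        have ha2 : ∃ y ∈ b :: t2, y.2 = a.2 := by
          have hmem : a ∈ (b :: t2).filter (fun p => p.2 == a.2) := by
            rw [← hfa]; simp [List.filter_cons]
          exact ⟨a, List.mem_of_mem_filter hmem, rfl⟩
        obtain ⟨y, hy, hyq⟩ := hb2
        obtain ⟨z, hz, hzq⟩ := ha2
        have h1' : a.2 ≤ b.2 := by
          rcases List.mem_cons.mp hy with h | h
          · rw [← h, hyq]
          · exact hyq ▸ h1h y h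
        have h2' : b.2 ≤ a.2 := by
          rcases List.mem_cons.mp hz with h | h
          · rw [← h, hzq]
          · exact hzq ▸ h2h z h
        omega
      have hfq := hf b.2
      simp only [List.filter_cons, hab, beq_self_eq_true, if_true] at hfq
      have hheads : a = b ∧ t1.filter (fun p => p.2 == b.2) = t2.filter (fun p => p.2 == b.2) := by
        simpa using hfq
      refine List.cons_eq_cons.mpr ⟨hheads.1, ?_⟩
      apply ih t2 h1t h2t
      intro q
      by_cases hq : q = b.2
      · rw [hq]; exact hheads.2
      · have hne : (a.2 == q) = false := by simp [hab]; omega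
        have hne2 : (b.2 == q) = false := by simp; omega
        have := hf q
        simp only [List.filter_cons, hne, hne2, Bool.false_eq_true, if_false] at this
        exact this

-- B's sweep over strictly increasing count values is sorted by count …
theorem pvFlatPairwise (R : List Int) (P : List (String × Int)) (h : R.Pairwise (· < ·)) :
    (R.flatMap (fun c => P.filter (fun p => p.2 == c))).Pairwise pvLe := by
  induction R with
  | nil => simp
  | cons c R ih =>
    obtain ⟨hc, ht⟩ := List.pairwise_cons.mp h
    simp only [List.flatMap_cons]
    rw [List.pairwise_append]
    refine ⟨?_, ih ht, ?_⟩
    · apply List.pairwise_of_forall_mem_list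
      intro a ha b hb
      have h1 : a.2 = c := by simpa using List.of_mem_filter ha
      have h2 : b.2 = c := by simpa using List.of_mem_filter hb
      simp [pvLe, h1, h2]
    · intro x hx y hy
      have hxc : x.2 = c := by simpa using List.of_mem_filter hx
      obtain ⟨c', hc', hy'⟩ := List.mem_flatMap.mp hy
      have hyc : y.2 = c' := by simpa using List.of_mem_filter hy'
      have : c < c' := hc c' hc'
      simp [pvLe, hxc, hyc]
      omega

-- … and it preserves every per-count filter of the pair list
theorem pvFlatFilter (R : List Int) (P : List (String × Int)) (q : Int) (hnd : R.Nodup) :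
    (R.flatMap (fun c => P.filter (fun p => p.2 == c))).filter (fun p => p.2 == q)
      = if q ∈ R then P.filter (fun p => p.2 == q) else [] := by
  induction R with
  | nil => simp
  | cons c R ih =>
    obtain ⟨hc, ht⟩ := List.nodup_cons.mp hnd
    simp only [List.flatMap_cons, List.filter_append, ih ht]
    have hbucket : (P.filter (fun p => p.2 == c)).filter (fun p => p.2 == q)
        = if q = c then P.filter (fun p => p.2 == q) else [] := by
      by_cases hqc : q = c
      · subst hqc; simp [List.filter_filter]
      · rw [if_neg hqc]
        apply List.filter_eq_nil_iff.mpr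
        intro x hx
        have : x.2 = c := by simpa using List.of_mem_filter hx
        simp [this]; omega
    rw [hbucket]
    by_cases hq : q = c
    · subst hq; simp [hc]
    · simp [hq, List.mem_cons]

-- A's counting loop builds exactly Counter(data) (B's loop is the Counter loop verbatim)
theorem pvFreqA (chars : List String) :
    chars.foldl (fun d ch =>
        if d.contains ch then d.insert ch (d.getD ch 0 + 1) else d.insert ch 1)
      PySem.Dict.empty = PySem.Dict.counter chars := by
  rw [← PySem.Dict.foldl_insert_getD_add_one_eq_counter]
  have hstep : (fun (d : PySem.Dict String Int) ch =>
      if d.contains ch then d.insert ch (d.getD ch 0 + 1) else d.insert ch 1)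
      = fun d ch => d.insert ch (d.getD ch 0 + 1) := by
    funext d ch
    by_cases h : d.contains ch
    · simp [h]
    · have h0 : d.getD ch 0 = 0 := by
        have h2 : d.get? ch = none :=
          (PySem.Dict.get?_eq_none_iff_contains d ch).mpr (by simpa using h)
        simp [PySem.Dict.getD, h2]
      simp [h, h0]
  rw [hstep]

-- every count in Counter(chars) is at least 1
theorem pvKeyPos (chars : List String) :
    ∀ p ∈ (PySem.Dict.counter chars).items, 1 ≤ p.2 := by
  intro p hp
  rw [PySem.Dict.items_counter] at hp
  obtain ⟨k, hk, hpk⟩ := List.mem_map.mp hp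
  have hkmem : k ∈ chars := (PySem.Set.mem_ofList chars k).mp hk
  have : 0 < chars.count k := List.count_pos_iff.mpr hkmem
  rw [← hpk]
  simp
  omega

-- ===== VERDICT (by name: the statement is the Claim_ definition above) =====
theorem huffman_sorted_pairs_spec : Claim_equal_huffman_sorted_pairs := by
  intro data _
  unfold Spec_huffman_sorted_pairs huffman_sorted_pairs huffman_sorted_pairs_alt
  simp only [pvFreqA, PySem.Dict.foldl_insert_getD_add_one_eq_counter]
  set chars := data.toList.map (fun c => String.ofList [c]) with hchars
  set F := PySem.Dict.counter chars with hF
  set P := F.items with hP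
  -- A's pairs list is exactly F.items
  have hpairs : F.keys.foldl (fun acc ch => acc ++ [(ch, F.getD ch 0)]) [] = P := by
    rw [PySem.List.foldl_append_singleton_eq_map, List.nil_append, hP,
        PySem.Dict.items_eq_map_keys F (PySem.Dict.nodup_keys_counter chars) 0]
  rw [hpairs]
  -- facts about the A side
  obtain ⟨hlen, hfil, hsorted, -⟩ :=
    pvOuter P P.length le_rfl
      ((PySem.List.pyRange 0 ((P.length : Nat) : Int) 1).foldl (pvPass (P.length : Int)) P) rfl
  rw [Nat.sub_self, List.drop_zero] at hsorted
  have hA : (PySem.List.pyRange 0 ((P.length : Nat) : Int) 1).foldl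
      (fun ps i => (PySem.List.pyRange 0 ((P.length : Int) - i - 1) 1).foldl pvBubbleStep ps) P
      = (PySem.List.pyRange 0 ((P.length : Nat) : Int) 1).foldl (pvPass (P.length : Int)) P := rfl
  by_cases hPnil : P = []
  · -- empty input: both sides are []
    have hsize : F.size = 0 := by
      have h0 : F.size = P.length := rfl
      rw [h0, hPnil]; rfl
    rw [if_pos hsize, hA]
    have : ((PySem.List.pyRange 0 ((P.length : Nat) : Int) 1).foldl (pvPass (P.length : Int)) P).length = 0 := by
      rw [hlen, hPnil]; rfl
    exact List.length_eq_zero_iff.mp this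
  · have hsize : ¬ F.size = 0 := by
      have h0 : F.size = P.length := rfl
      rw [h0]
      intro h
      exact hPnil (List.length_eq_zero_iff.mp h)
    rw [if_neg hsize]
    -- the maximum count
    have hvals : F.values = P.map (·.2) := rfl
    have hvne : F.values ≠ [] := by
      rw [hvals]; simpa using hPnil
    cases hmx : PySem.List.max? F.values (fun v => v) with
    | none => exact absurd ((PySem.List.max?_eq_none_iff _ _).mp hmx) hvne
    | some m =>
    simp only [Option.getD_some]
    -- B is the flatMap of per-count filters over 1..m
    have hB : (PySem.List.pyRange 1 (m + 1) 1).foldl (fun acc count =>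
        P.foldl (fun acc p => if p.2 == count then acc ++ [p] else acc) acc) []
        = (PySem.List.pyRange 1 (m + 1) 1).flatMap (fun c => P.filter (fun p => p.2 == c)) := by
      simp only [PySem.List.foldl_append_if_eq_filter]
      rw [PySem.List.foldl_append_eq_flatMap, List.nil_append]
    rw [hA, hB]
    -- keys of P lie in [1, m]
    have hbound : ∀ p ∈ P, 1 ≤ p.2 ∧ p.2 ≤ m := by
      intro p hp
      refine ⟨pvKeyPos chars p hp, ?_⟩
      have : p.2 ∈ F.values := by rw [hvals]; exact List.mem_map_of_mem hp
      exact PySem.List.max?_isMax hmx p.2 this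
    apply pvUnique _ _ hsorted
      (pvFlatPairwise _ P (PySem.List.pairwise_lt_pyRange_one 1 (m + 1)))
    intro q
    rw [hfil q, pvFlatFilter _ P q (PySem.List.nodup_pyRange_one 1 (m + 1))]
    by_cases hq : q ∈ PySem.List.pyRange 1 (m + 1) 1
    · rw [if_pos hq]
    · rw [if_neg hq]
      apply List.filter_eq_nil_iff.mpr
      intro p hp
      obtain ⟨hlo, hhi⟩ := hbound p hp
      have : ¬ (1 ≤ q ∧ q < m + 1) := fun hcon => hq (PySem.List.mem_pyRange_one.mpr hcon)
      simp
      omega
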